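-- pv_equiv track=rewrite | github.com/arash-shahmansoori/dynamic-consent-management | create_disjoint_train_test_dataset/create_disjoint_train_test_vox.py | compute_val_logic_v5
-- ===== SOURCE A (Python) =====
-- def compute_unique_list(folder_ids):
--     res = []
--     for item in folder_ids:
--         if item not in res:
--             res.append(item)
--     return res
--
-- def compute_val_logic_v5(utt_id, folder_ids, eval_utts_per_folder, eval_utts=4):
--     folder_ids_unique = compute_unique_list(folder_ids)
--     val_logic_spk_collect = []
--     count = 0
--     for _ in folder_ids_unique:
--         if utt_id <= eval_utts_per_folder and count <= eval_utts:
--             val_logic_spk_collect.append(True)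
--             count += 1
--         else:
--             val_logic_spk_collect.append(False)
--
--     return all(val_logic_spk_collect)
-- ===== SOURCE B (Python) =====
-- def compute_val_logic_v5(utt_id, folder_ids, eval_utts_per_folder, eval_utts=4):
--     n = len(set(folder_ids))
--     return n == 0 or (utt_id <= eval_utts_per_folder and n <= eval_utts + 1)
-- ===== Notes on version B (the rewrite author's own statement) =====
-- stated objective: faster
-- what changed: Replaced the O(n^2) unique-list build plus the append-booleans-then-all() loop by a single closed-form boolean over the distinct count len(set(folder_ids)): empty means True, otherwise utt_id <= eval_utts_per_folder and n <= eval_utts + 1.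
import Mathlib
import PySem

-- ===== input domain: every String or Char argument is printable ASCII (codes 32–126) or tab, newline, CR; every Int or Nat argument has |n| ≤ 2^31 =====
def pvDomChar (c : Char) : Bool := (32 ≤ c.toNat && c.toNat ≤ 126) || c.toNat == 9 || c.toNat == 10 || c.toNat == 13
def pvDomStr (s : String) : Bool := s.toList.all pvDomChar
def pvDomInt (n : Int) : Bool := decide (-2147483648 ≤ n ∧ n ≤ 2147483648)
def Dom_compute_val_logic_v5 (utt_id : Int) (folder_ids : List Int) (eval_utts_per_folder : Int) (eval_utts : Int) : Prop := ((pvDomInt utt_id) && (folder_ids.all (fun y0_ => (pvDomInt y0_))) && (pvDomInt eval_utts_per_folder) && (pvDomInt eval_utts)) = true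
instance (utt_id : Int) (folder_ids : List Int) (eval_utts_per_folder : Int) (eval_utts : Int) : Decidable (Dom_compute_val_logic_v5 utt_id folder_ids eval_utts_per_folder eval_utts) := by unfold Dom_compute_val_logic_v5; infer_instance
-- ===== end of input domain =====

-- B replaces A's unique-list build and append-booleans-then-all() loop by one closed-form
-- boolean over the distinct count len(set(folder_ids)) (objective: faster, O(n^2) -> O(n)).

-- ===== PORT A =====
-- helper: compute_unique_list
def compute_unique_list (folder_ids : List Int) : List Int :=
  folder_ids.foldl (fun res item => if item ∈ res then res else res ++ [item]) []

def compute_val_logic_v5 (utt_id : Int) (folder_ids : List Int) (eval_utts_per_folder : Int) (eval_utts : Int) : Bool :=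
  let folder_ids_unique := compute_unique_list folder_ids
  let st := folder_ids_unique.foldl
    (fun (st : List Bool × Int) _ =>
      if utt_id ≤ eval_utts_per_folder ∧ st.2 ≤ eval_utts then
        (st.1 ++ [true], st.2 + 1)
      else
        (st.1 ++ [false], st.2))
    ([], 0)
  st.1.all id

-- ===== PORT B =====
def compute_val_logic_v5_alt (utt_id : Int) (folder_ids : List Int) (eval_utts_per_folder : Int) (eval_utts : Int) : Bool :=
  let n : Int := (PySem.Set.ofList folder_ids).length
  n == 0 || (decide (utt_id ≤ eval_utts_per_folder) && decide (n ≤ eval_utts + 1))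

-- ===== PRECONDITION & SPEC =====
def Spec_compute_val_logic_v5 (utt_id : Int) (folder_ids : List Int) (eval_utts_per_folder : Int) (eval_utts : Int) (out : Bool) : Prop := out = compute_val_logic_v5_alt utt_id folder_ids eval_utts_per_folder eval_utts
instance (utt_id : Int) (folder_ids : List Int) (eval_utts_per_folder : Int) (eval_utts : Int) (out : Bool) : Decidable (Spec_compute_val_logic_v5 utt_id folder_ids eval_utts_per_folder eval_utts out) := by unfold Spec_compute_val_logic_v5; infer_instance

-- ===== CLAIM (what is proved, stated in full; the proofs are below) =====
def Claim_equal_compute_val_logic_v5 : Prop := ∀ (utt_id : Int) (folder_ids : List Int) (eval_utts_per_folder : Int) (eval_utts : Int), Dom_compute_val_logic_v5 utt_id folder_ids eval_utts_per_folder eval_utts → Spec_compute_val_logic_v5 utt_id folder_ids eval_utts_per_folder eval_utts (compute_val_logic_v5 utt_id folder_ids eval_utts_per_folder eval_utts)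

-- ===== LEMMAS AND PROOFS =====

-- A's unique list is exactly set(folder_ids) (first occurrences, in order)
theorem compute_unique_list_eq_ofList (l : List Int) :
    compute_unique_list l = PySem.Set.ofList l := by
  have hf : (fun (res : List Int) (item : Int) => if item ∈ res then res else res ++ [item])
      = PySem.Set.add := by
    funext res item
    simp [PySem.Set.add, PySem.Set.contains, List.contains_eq_mem]
  rw [PySem.Set.ofList_eq_foldl]
  unfold compute_unique_list
  rw [hf]

-- invariant of A's collect loop: the collected list is all-true iff the unique list is
-- empty or the closed-form bound holds
theorem loop_all (utt_id eupf eu : Int) (u : List Int) :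
    ∀ (acc : List Bool) (c : Int),
      ((u.foldl
        (fun (st : List Bool × Int) _ =>
          if utt_id ≤ eupf ∧ st.2 ≤ eu then (st.1 ++ [true], st.2 + 1)
          else (st.1 ++ [false], st.2)) (acc, c)).1.all id)
      = (acc.all id && (u.isEmpty || (decide (utt_id ≤ eupf) && decide ((u.length : Int) + c ≤ eu + 1)))) := by
  induction u with
  | nil => intro acc c; simp
  | cons x xs ih =>
      intro acc c
      simp only [List.foldl_cons]
      by_cases h : utt_id ≤ eupf ∧ c ≤ eu
      · rw [if_pos h]
        rw [ih (acc ++ [true]) (c + 1)]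
        rcases h with ⟨h1, h2⟩
        cases xs with
        | nil => simp [h1]; omega
        | cons y ys =>
            simp [h1]
            have h3 : ((ys.length : Int) + 1 + (c + 1)) = (ys.length : Int) + 1 + 1 + c := by ring
            rw [h3]
      · rw [if_neg h]
        rw [ih (acc ++ [false]) c]
        by_cases h1 : utt_id ≤ eupf
        · have h2 : ¬ (c ≤ eu) := fun hc => h ⟨h1, hc⟩
          have h3 : ¬ ((xs.length : Int) + 1 + c ≤ eu + 1) := by omega
          simp [h3]
        · simp [h1]

-- ===== VERDICT (by name: the statement is the Claim_ definition above) =====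
theorem compute_val_logic_v5_spec : Claim_equal_compute_val_logic_v5 := by
  intro utt_id folder_ids eupf eu _
  unfold Spec_compute_val_logic_v5 compute_val_logic_v5 compute_val_logic_v5_alt
  simp only [compute_unique_list_eq_ofList]
  rw [loop_all]
  cases h : PySem.Set.ofList folder_ids with
  | nil => simp
  | cons x xs => simp; omega
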